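-- pv_equiv track=rewrite | github.com/SolanaSergio/Agent-Sylvester | src/builders/project_builder.py | _format_imports
-- ===== SOURCE A (Python) =====
-- from typing import Dict, List, Optional
--
-- def _format_imports(imports: List[str]) -> str:
--     """Format import statements."""
--     # Remove duplicates and sort
--     unique_imports = sorted(set(imports))
--
--     # Group imports by type
--     react_imports = []
--     next_imports = []
--     hook_imports = []
--     component_imports = []
--     other_imports = []
--
--     for imp in unique_imports:
--         if 'react' in imp.lower():
--             react_imports.append(imp)
--         elif 'next' in imp.lower():
--             next_imports.append(imp)
--         elif '/hooks/' in imp: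
--             hook_imports.append(imp)
--         elif '/components/' in imp:
--             component_imports.append(imp)
--         else:
--             other_imports.append(imp)
--
--     # Join all groups with newlines between them
--     formatted = []
--     if react_imports:
--         formatted.extend(react_imports)
--     if next_imports:
--         if formatted: formatted.append('')
--         formatted.extend(next_imports)
--     if hook_imports:
--         if formatted: formatted.append('')
--         formatted.extend(hook_imports)
--     if component_imports:
--         if formatted: formatted.append('')
--         formatted.extend(component_imports)
--     if other_imports:
--         if formatted: formatted.append('')
--         formatted.extend(other_imports)
--
--     return '\n'.join(formatted)
-- ===== SOURCE B (Python) =====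
-- def _rank(imp: str) -> int:
--     low = imp.lower()
--     if 'react' in low:
--         return 0
--     if 'next' in low:
--         return 1
--     if '/hooks/' in imp:
--         return 2
--     if '/components/' in imp:
--         return 3
--     return 4
--
--
-- def _format_imports(imports):
--     """Format import statements: dedupe, sort within category, blank line between categories."""
--     unique = sorted(set(imports))
--     out = []
--     prev = None
--     for imp in sorted(unique, key=lambda i: (_rank(i), i)):
--         r = _rank(imp)
--         if prev is not None and r != prev:
--             out.append('')
--         out.append(imp)
--         prev = r
--     return '\n'.join(out)
-- ===== Notes on version B (the rewrite author's own statement) =====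
-- stated objective: simpler
-- what changed: Replaces A's five explicit category buckets and the bucket-joining if/elif chain by a rank(imp) helper, one flat sort keyed by (rank, imp) and a single pass that inserts a blank line at each rank change.
import Mathlib
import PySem

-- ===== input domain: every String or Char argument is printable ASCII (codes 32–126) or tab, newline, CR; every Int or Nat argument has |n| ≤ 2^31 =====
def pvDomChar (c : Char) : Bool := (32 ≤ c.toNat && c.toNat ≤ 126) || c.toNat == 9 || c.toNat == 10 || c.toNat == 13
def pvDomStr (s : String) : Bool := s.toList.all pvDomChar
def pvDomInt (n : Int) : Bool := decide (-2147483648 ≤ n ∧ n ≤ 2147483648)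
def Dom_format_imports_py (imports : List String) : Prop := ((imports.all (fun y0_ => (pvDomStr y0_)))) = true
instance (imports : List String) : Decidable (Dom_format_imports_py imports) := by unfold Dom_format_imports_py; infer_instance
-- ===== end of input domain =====

-- B replaces A's five explicit category buckets and bucket-joining if-chain by a rank
-- function, one flat sort keyed by (rank, import) and a single pass inserting a blank
-- line at each rank change (objective: simpler decomposition, same result).

-- ===== PORT A =====
def format_imports_py (imports : List String) : String :=
  let unique := PySem.List.sorted (PySem.Set.ofList imports) (fun x => x)
  let groups := unique.foldl
    (fun (acc : List String × List String × List String × List String × List String) imp =>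
      match acc with
      | (r, n, h, c, o) =>
        if PySem.Str.isIn "react" (PySem.Str.lower imp) then (r ++ [imp], n, h, c, o)
        else if PySem.Str.isIn "next" (PySem.Str.lower imp) then (r, n ++ [imp], h, c, o)
        else if PySem.Str.isIn "/hooks/" imp then (r, n, h ++ [imp], c, o)
        else if PySem.Str.isIn "/components/" imp then (r, n, h, c ++ [imp], o)
        else (r, n, h, c, o ++ [imp]))
    ([], [], [], [], [])
  match groups with
  | (ri, ni, hi, ci, oi) =>
    let f : List String := []
    let f := if ri.isEmpty then f else f ++ ri
    let f := if ni.isEmpty then f else (if f.isEmpty then f else f ++ [""]) ++ ni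
    let f := if hi.isEmpty then f else (if f.isEmpty then f else f ++ [""]) ++ hi
    let f := if ci.isEmpty then f else (if f.isEmpty then f else f ++ [""]) ++ ci
    let f := if oi.isEmpty then f else (if f.isEmpty then f else f ++ [""]) ++ oi
    PySem.Str.join "\n" f

-- ===== PORT B =====
def pvRank (imp : String) : Int :=
  let low := PySem.Str.lower imp
  if PySem.Str.isIn "react" low then 0
  else if PySem.Str.isIn "next" low then 1
  else if PySem.Str.isIn "/hooks/" imp then 2
  else if PySem.Str.isIn "/components/" imp then 3
  else 4

def format_imports_py_alt (imports : List String) : String :=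
  let unique := PySem.List.sorted (PySem.Set.ofList imports) (fun x => x)
  let flat := PySem.List.sorted2 unique pvRank (fun i => i)
  let st := flat.foldl
    (fun (st : List String × Option Int) imp =>
      let r := pvRank imp
      let out := match st.2 with
        | some p => if r ≠ p then st.1 ++ [""] ++ [imp] else st.1 ++ [imp]
        | none => st.1 ++ [imp]
      (out, some r))
    ([], none)
  PySem.Str.join "\n" st.1

-- ===== PRECONDITION & SPEC =====
def Spec_format_imports_py (imports : List String) (out : String) : Prop := out = format_imports_py_alt imports
instance (imports : List String) (out : String) : Decidable (Spec_format_imports_py imports out) := by unfold Spec_format_imports_py; infer_instance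

-- ===== CLAIM (what is proved, stated in full; the proofs are below) =====
def Claim_equal_format_imports_py : Prop := ∀ (imports : List String), Dom_format_imports_py imports → Spec_format_imports_py imports (format_imports_py imports)

-- ===== LEMMAS AND PROOFS =====

-- the elif-chain membership tests of A, as exclusive predicates
def pvQ (i : Int) (x : String) : Bool :=
  decide (pvRank x = i)

theorem pvRank_cases (x : String) :
    pvRank x = 0 ∨ pvRank x = 1 ∨ pvRank x = 2 ∨ pvRank x = 3 ∨ pvRank x = 4 := by
  unfold pvRank; dsimp only; split_ifs <;> simp

-- A's bucket fold produces the five filters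
theorem pvAfold (u : List String)
    (a b c d e : List String) :
    u.foldl
      (fun (acc : List String × List String × List String × List String × List String) imp =>
        match acc with
        | (r, n, h, c, o) =>
          if PySem.Str.isIn "react" (PySem.Str.lower imp) then (r ++ [imp], n, h, c, o)
          else if PySem.Str.isIn "next" (PySem.Str.lower imp) then (r, n ++ [imp], h, c, o)
          else if PySem.Str.isIn "/hooks/" imp then (r, n, h ++ [imp], c, o)
          else if PySem.Str.isIn "/components/" imp then (r, n, h, c ++ [imp], o)
          else (r, n, h, c, o ++ [imp]))
      (a, b, c, d, e)
    = (a ++ u.filter (pvQ 0), b ++ u.filter (pvQ 1), c ++ u.filter (pvQ 2),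
       d ++ u.filter (pvQ 3), e ++ u.filter (pvQ 4)) := by
  induction u generalizing a b c d e with
  | nil => simp
  | cons x t ih =>
    simp only [List.foldl_cons]
    by_cases h0 : PySem.Str.isIn "react" (PySem.Str.lower x) = true
    · simp only [h0, if_pos]
      rw [ih]
      simp at h0
      simp [List.filter_cons, pvQ, pvRank, h0]
    · by_cases h1 : PySem.Str.isIn "next" (PySem.Str.lower x) = true
      · simp only [h0, h1, if_neg, if_pos, Bool.false_eq_true, not_false_iff]
        rw [ih]
        simp at h0 h1
        simp [List.filter_cons, pvQ, pvRank, h0, h1]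
      · by_cases h2 : PySem.Str.isIn "/hooks/" x = true
        · simp only [h0, h1, h2, if_neg, if_pos, Bool.false_eq_true, not_false_iff]
          rw [ih]
          simp at h0 h1 h2
          simp [List.filter_cons, pvQ, pvRank, h0, h1, h2]
        · by_cases h3 : PySem.Str.isIn "/components/" x = true
          · simp only [h0, h1, h2, h3, if_neg, if_pos, Bool.false_eq_true, not_false_iff]
            rw [ih]
            simp at h0 h1 h2 h3
            simp [List.filter_cons, pvQ, pvRank, h0, h1, h2, h3]
          · simp only [h0, h1, h2, h3, if_neg, Bool.false_eq_true, not_false_iff]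
            rw [ih]
            simp at h0 h1 h2 h3
            simp [List.filter_cons, pvQ, pvRank, h0, h1, h2, h3]

theorem pvRank_of_mem_filter {i : Int} {u : List String} {x : String}
    (h : x ∈ u.filter (pvQ i)) : pvRank x = i := by
  have := (List.mem_filter.mp h).2
  simpa [pvQ] using this

-- B's (rank, import) key, lexicographically ordered
def pvKey (x : String) : Int ×ₗ String := toLex (pvRank x, x)

theorem pvSorted2_eq_sorted (u : List String) :
    PySem.List.sorted2 u pvRank (fun i => i) = PySem.List.sorted u pvKey := by
  rw [PySem.List.sorted_eq_foldl_insertBy]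
  unfold PySem.List.sorted2
  simp only [Bool.false_eq_true, if_neg, not_false_iff]
  congr 1
  funext acc x
  congr 1
  funext a b
  rcases lt_trichotomy (pvRank a) (pvRank b) with h | h | h
  · simp [pvKey, Prod.Lex.lt_iff, h, not_lt.mpr h.le]
  · simp [pvKey, Prod.Lex.lt_iff, h, lt_irrefl]
  · simp [pvKey, Prod.Lex.lt_iff, h, not_lt.mpr h.le, h.ne']

theorem pvPerm (u : List String) :
    (u.filter (pvQ 0) ++ u.filter (pvQ 1) ++ u.filter (pvQ 2)
      ++ u.filter (pvQ 3) ++ u.filter (pvQ 4)).Perm u := by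
  have hz : ∀ (i : Int) (l : List String) (y : String), pvQ i y = false →
      List.count y (l.filter (pvQ i)) = 0 := by
    intro i l y hy
    refine List.count_eq_zero.mpr (fun hm => ?_)
    have := (List.mem_filter.mp hm).2
    simp [hy] at this
  rw [List.perm_iff_count]
  intro y
  simp only [List.count_append]
  rcases pvRank_cases y with h | h | h | h | h
  · rw [List.count_filter (p := pvQ 0) (by simp [pvQ, h]), hz 1 u y (by simp [pvQ, h]),
      hz 2 u y (by simp [pvQ, h]), hz 3 u y (by simp [pvQ, h]), hz 4 u y (by simp [pvQ, h])]
    omega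
  · rw [List.count_filter (p := pvQ 1) (by simp [pvQ, h]), hz 0 u y (by simp [pvQ, h]),
      hz 2 u y (by simp [pvQ, h]), hz 3 u y (by simp [pvQ, h]), hz 4 u y (by simp [pvQ, h])]
    omega
  · rw [List.count_filter (p := pvQ 2) (by simp [pvQ, h]), hz 0 u y (by simp [pvQ, h]),
      hz 1 u y (by simp [pvQ, h]), hz 3 u y (by simp [pvQ, h]), hz 4 u y (by simp [pvQ, h])]
    omega
  · rw [List.count_filter (p := pvQ 3) (by simp [pvQ, h]), hz 0 u y (by simp [pvQ, h]),
      hz 1 u y (by simp [pvQ, h]), hz 2 u y (by simp [pvQ, h]), hz 4 u y (by simp [pvQ, h])]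
    omega
  · rw [List.count_filter (p := pvQ 4) (by simp [pvQ, h]), hz 0 u y (by simp [pvQ, h]),
      hz 1 u y (by simp [pvQ, h]), hz 2 u y (by simp [pvQ, h]), hz 3 u y (by simp [pvQ, h])]
    omega

-- B's flat sort equals the concatenation of the five filters
theorem pvFlat (u : List String) (hp : u.Pairwise (· < ·)) :
    PySem.List.sorted2 u pvRank (fun i => i)
      = u.filter (pvQ 0) ++ u.filter (pvQ 1) ++ u.filter (pvQ 2)
        ++ u.filter (pvQ 3) ++ u.filter (pvQ 4) := by
  rw [pvSorted2_eq_sorted]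
  apply PySem.List.sorted_eq_of_perm_of_pairwise_lt _ _ pvKey (pvPerm u)
  have cross' : ∀ a b : String, pvRank a < pvRank b → pvKey a < pvKey b := by
    intro a b hab
    rw [pvKey, pvKey, Prod.Lex.lt_iff]
    exact Or.inl hab
  have seg : ∀ i : Int, (u.filter (pvQ i)).Pairwise (fun a b => pvKey a < pvKey b) := by
    intro i
    have hsub : (u.filter (pvQ i)).Pairwise (· < ·) := hp.sublist List.filter_sublist
    refine hsub.imp_of_mem ?_
    intro a b ha hb hlt
    have hra := pvRank_of_mem_filter ha
    have hrb := pvRank_of_mem_filter hb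
    rw [pvKey, pvKey, hra, hrb, Prod.Lex.lt_iff]
    exact Or.inr ⟨rfl, hlt⟩
  rw [List.pairwise_append, List.pairwise_append, List.pairwise_append, List.pairwise_append]
  refine ⟨⟨⟨⟨seg 0, seg 1, ?_⟩, seg 2, ?_⟩, seg 3, ?_⟩, seg 4, ?_⟩
  · intro a ha b hb
    have hrb := pvRank_of_mem_filter hb
    have hra := pvRank_of_mem_filter ha
    exact cross' a b (by omega)
  · intro a ha b hb
    have hrb := pvRank_of_mem_filter hb
    simp only [List.mem_append] at ha
    apply cross'
    rcases ha with ha | ha <;> (have hra := pvRank_of_mem_filter ha; omega)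
  · intro a ha b hb
    have hrb := pvRank_of_mem_filter hb
    simp only [List.mem_append] at ha
    apply cross'
    rcases ha with (ha | ha) | ha <;> (have hra := pvRank_of_mem_filter ha; omega)
  · intro a ha b hb
    have hrb := pvRank_of_mem_filter hb
    simp only [List.mem_append] at ha
    apply cross'
    rcases ha with ((ha | ha) | ha) | ha <;> (have hra := pvRank_of_mem_filter ha; omega)

-- B's separator pass over a run of constant rank
theorem pvB_const (l : List String) (r : Int) (hr : ∀ x ∈ l, pvRank x = r) :
    ∀ out : List String,
    l.foldl
      (fun (st : List String × Option Int) imp =>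
        let r := pvRank imp
        let out := match st.2 with
          | some p => if r ≠ p then st.1 ++ [""] ++ [imp] else st.1 ++ [imp]
          | none => st.1 ++ [imp]
        (out, some r))
      (out, some r) = (out ++ l, some r) := by
  induction l with
  | nil => intro out; simp
  | cons x t ih =>
    intro out
    have hx : pvRank x = r := hr x (by simp)
    simp only [List.foldl_cons, hx, ne_eq, not_true_eq_false, if_neg, ite_self]
    rw [ih (fun y hy => hr y (by simp [hy]))]
    simp
theorem pvB_group (l : List String) (r : Int) (hne : l ≠ []) (hr : ∀ x ∈ l, pvRank x = r)
    (acc : List String) (st : Option Int) (hst : ∀ p : Int, st = some p → p ≠ r) :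
    l.foldl
      (fun (st : List String × Option Int) imp =>
        let r := pvRank imp
        let out := match st.2 with
          | some p => if r ≠ p then st.1 ++ [""] ++ [imp] else st.1 ++ [imp]
          | none => st.1 ++ [imp]
        (out, some r))
      (acc, st)
    = ((match st with | none => acc ++ l | some _ => acc ++ "" :: l), some r) := by
  rcases l with _ | ⟨x, t⟩
  · exact absurd rfl hne
  have hx : pvRank x = r := hr x (by simp)
  have ht : ∀ y ∈ t, pvRank y = r := fun y hy => hr y (by simp [hy])
  rcases st with _ | p
  · simp only [List.foldl_cons]
    rw [hx, pvB_const t r ht]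
    simp
  · have hpr : p ≠ r := hst p rfl
    simp only [List.foldl_cons, hx, ne_eq]
    rw [if_pos (by exact fun hh => hpr hh.symm)]
    rw [pvB_const t r ht]
    simp
-- B's single separator pass over concatenated rank groups = A's bucket-joining chain
theorem pvChain (gs : List (Int × List String)) :
    ∀ (acc : List String) (st : Option Int),
    (∀ p ∈ gs, ∀ x ∈ p.2, pvRank x = p.1) →
    (∀ p ∈ gs, ∀ q : Int, st = some q → q ≠ p.1) →
    gs.Pairwise (fun a b => a.1 ≠ b.1) →
    (acc.isEmpty ↔ st = none) →
    ((gs.map Prod.snd).flatten.foldl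
      (fun (st : List String × Option Int) imp =>
        let r := pvRank imp
        let out := match st.2 with
          | some p => if r ≠ p then st.1 ++ [""] ++ [imp] else st.1 ++ [imp]
          | none => st.1 ++ [imp]
        (out, some r))
      (acc, st)).1
    = gs.foldl (fun f p => if p.2.isEmpty then f
        else (if f.isEmpty then f else f ++ [""]) ++ p.2) acc := by
  induction gs with
  | nil => intro acc st _ _ _ _; rfl
  | cons g gs ih =>
    intro acc st h1 h2 h3 h4
    obtain ⟨r, l⟩ := g
    simp only [List.map_cons, List.flatten_cons, List.foldl_append, List.foldl_cons]
    by_cases hl : l = []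
    · subst hl
      simp only [List.foldl_nil, List.isEmpty_nil, if_pos]
      exact ih acc st (fun p hp => h1 p (by simp [hp]))
        (fun p hp => h2 p (by simp [hp])) (h3.sublist (by simp)) h4
    · have hr : ∀ x ∈ l, pvRank x = r := h1 (r, l) (by simp)
      rw [pvB_group l r hl hr acc st (fun p hp => h2 (r, l) (by simp) p hp)]
      have hle : l.isEmpty = false := by simpa using hl
      rcases st with _ | p
      · have hacc : acc = [] := by simpa using h4.mpr rfl
        subst hacc
        simp only [hle, Bool.false_eq_true, if_neg, not_false_iff, List.isEmpty_nil,
          if_pos, List.nil_append]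
        refine ih l (some r) (fun p hp => h1 p (by simp [hp])) ?_ (h3.sublist (by simp)) ?_
        · intro p hp q hq hqr
          have := (List.pairwise_cons.mp h3).1 p hp
          apply this
          simpa [hqr] using hq
        · simpa using hl
      · have hacc : acc ≠ [] := by
          intro h; rw [h] at h4; simp at h4
        have hacce : acc.isEmpty = false := by simpa using hacc
        simp only [hle, hacce, Bool.false_eq_true, if_neg, not_false_iff]
        have : acc ++ "" :: l = (acc ++ [""]) ++ l := by simp
        rw [this]
        refine ih ((acc ++ [""]) ++ l) (some r) (fun p hp => h1 p (by simp [hp])) ?_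
          (h3.sublist (by simp)) ?_
        · intro p hp q hq hqr
          have := (List.pairwise_cons.mp h3).1 p hp
          apply this
          simpa [hqr] using hq
        · simp

-- ===== VERDICT (by name: the statement is the Claim_ definition above) =====
theorem format_imports_py_spec : Claim_equal_format_imports_py := by
  intro imports _
  show format_imports_py imports = format_imports_py_alt imports
  have hp : (PySem.List.sorted (PySem.Set.ofList imports) (fun x => x)).Pairwise (· < ·) :=
    PySem.List.sorted_ofList_pairwise_lt imports
  unfold format_imports_py format_imports_py_alt
  dsimp only
  rw [pvAfold, pvFlat _ hp]
  set u := PySem.List.sorted (PySem.Set.ofList imports) (fun x => x) with hu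
  have hchain := pvChain
    [(0, u.filter (pvQ 0)), (1, u.filter (pvQ 1)), (2, u.filter (pvQ 2)),
     (3, u.filter (pvQ 3)), (4, u.filter (pvQ 4))] [] none
    (by
      intro p hp' x hx
      fin_cases hp' <;> exact pvRank_of_mem_filter hx)
    (by intro p _ q hq; cases hq)
    (by norm_num [List.pairwise_cons])
    (by simp)
  simp only [List.map_cons, List.map_nil, List.flatten_cons, List.flatten_nil,
    List.append_nil, List.foldl_cons, List.foldl_nil] at hchain
  simp only [← List.append_assoc] at hchain
  congr 1
  exact hchain.symm
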